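-- pv_equiv track=rewrite | github.com/Kyworn/slopwise | src/slopwise/agents/clusterer.py | _ensure_complete
-- ===== SOURCE A (Python) =====
-- def _ensure_complete(
--     themes: dict[str, list[str]], expected: set[str]
-- ) -> dict[str, list[str]]:
--     """Drop unknown names and dump anything the model forgot into a
--     catch-all bucket so every analyzed function appears exactly once
--     in the report."""
--     seen: set[str] = set()
--     cleaned: dict[str, list[str]] = {}
--     for theme, funcs in themes.items():
--         kept = [f for f in funcs if f in expected and f not in seen]
--         if kept:
--             cleaned[theme] = kept
--             seen.update(kept)
--     missing = expected - seen
--     if missing: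
--         cleaned.setdefault("Miscellaneous", []).extend(sorted(missing))
--     return cleaned
-- ===== SOURCE B (Python) =====
-- def _ensure_complete(
--     themes: dict[str, list[str]], expected: set[str]
-- ) -> dict[str, list[str]]:
--     # Index pass: map each expected function to the FIRST theme that lists it.
--     assignment: dict[str, str] = {}
--     for theme, funcs in themes.items():
--         for f in funcs:
--             if f in expected and f not in assignment:
--                 assignment[f] = theme
--     # Regroup pass: a theme keeps exactly the funcs assigned to it.
--     cleaned: dict[str, list[str]] = {}
--     for theme, funcs in themes.items():
--         kept = [f for f in funcs if assignment.get(f) == theme]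
--         if kept:
--             cleaned[theme] = kept
--     missing = expected - assignment.keys()
--     if missing:
--         cleaned.setdefault("Miscellaneous", []).extend(sorted(missing))
--     return cleaned
-- ===== Notes on version B (the rewrite author's own statement) =====
-- stated objective: alternative
-- what changed: Replaces the single accumulate-as-you-go pass (running 'seen' set, emit while scanning) by an index-build pass mapping each expected function to its first theme followed by a separate regroup pass that keeps f in a theme iff the index assigns f to it.
import Mathlib
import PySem

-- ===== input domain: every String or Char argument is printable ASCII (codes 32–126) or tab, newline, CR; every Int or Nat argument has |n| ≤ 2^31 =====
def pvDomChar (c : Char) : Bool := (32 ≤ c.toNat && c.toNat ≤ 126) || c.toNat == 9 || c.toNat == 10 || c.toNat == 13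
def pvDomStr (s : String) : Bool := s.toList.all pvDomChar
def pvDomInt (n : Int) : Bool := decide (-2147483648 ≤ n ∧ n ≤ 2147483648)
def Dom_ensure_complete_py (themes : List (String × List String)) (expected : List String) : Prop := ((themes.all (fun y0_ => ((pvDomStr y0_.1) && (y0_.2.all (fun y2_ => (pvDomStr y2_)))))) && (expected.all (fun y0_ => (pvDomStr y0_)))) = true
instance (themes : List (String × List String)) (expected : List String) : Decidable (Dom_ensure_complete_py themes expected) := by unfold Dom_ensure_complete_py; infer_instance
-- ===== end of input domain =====

-- B replaces A's single accumulate-as-you-go pass (running `seen` set) by an index pass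
-- (func → first theme) followed by a separate regroup pass; alternative decomposition, same cost.
-- ===== PORT A =====
-- kept = [f for f in funcs if f in expected and f not in seen]
def pvKeptA (expected : List String) (seen : PySem.Set String) (fs : List String) : List String :=
  fs.filter (fun f => PySem.Set.contains expected f && !(PySem.Set.contains seen f))

-- one iteration of A's `for theme, funcs in themes.items():` loop over the state (seen, cleaned)
def pvStepA (expected : List String)
    (st : PySem.Set String × PySem.Dict String (List String)) (tf : String × List String) :
    PySem.Set String × PySem.Dict String (List String) :=
  let kept := pvKeptA expected st.1 tf.2
  if kept ≠ [] then (PySem.Set.update st.1 kept, st.2.insert tf.1 kept) else st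

def ensure_complete_py (themes : List (String × List String)) (expected : List String) :
    List (String × List String) :=
  let st := themes.foldl (pvStepA expected) (PySem.Set.empty, PySem.Dict.empty)
  let missing := PySem.Set.diff expected st.1
  -- cleaned.setdefault("Miscellaneous", []).extend(sorted(missing))  =  modify with default []
  let cleaned := if missing ≠ [] then
      st.2.modify "Miscellaneous" [] (fun v => v ++ PySem.List.sorted missing (fun x => x) false)
    else st.2
  cleaned.items

-- ===== PORT B =====
-- inner body of B's index pass: assign f to theme if f in expected and f not in assignment
def pvAsgnStep (expected : List String) (theme : String)
    (a : PySem.Dict String String) (f : String) : PySem.Dict String String :=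
  if PySem.Set.contains expected f && !(a.contains f) then a.insert f theme else a

def pvBuildAsgn (expected : List String) (a : PySem.Dict String String)
    (ts : List (String × List String)) : PySem.Dict String String :=
  ts.foldl (fun a tf => tf.2.foldl (pvAsgnStep expected tf.1) a) a

-- kept = [f for f in funcs if assignment.get(f) == theme]
def pvKeptB (asgn : PySem.Dict String String) (theme : String) (fs : List String) : List String :=
  fs.filter (fun f => asgn.get? f == some theme)

-- one iteration of B's regroup pass
def pvStepB (asgn : PySem.Dict String String)
    (c : PySem.Dict String (List String)) (tf : String × List String) :
    PySem.Dict String (List String) :=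
  let kept := pvKeptB asgn tf.1 tf.2
  if kept ≠ [] then c.insert tf.1 kept else c

def ensure_complete_py_alt (themes : List (String × List String)) (expected : List String) :
    List (String × List String) :=
  let asgn := pvBuildAsgn expected PySem.Dict.empty themes
  let cleaned := themes.foldl (pvStepB asgn) PySem.Dict.empty
  let missing := PySem.Set.diff expected asgn.keys
  let cleaned := if missing ≠ [] then
      cleaned.modify "Miscellaneous" [] (fun v => v ++ PySem.List.sorted missing (fun x => x) false)
    else cleaned
  cleaned.items

-- ===== PRECONDITION & SPEC =====
-- Pre_ excludes only association lists with duplicate theme keys: a Python dict cannot contain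
-- a duplicate key, so such lists do not represent any input A ever receives.
def Pre_ensure_complete_py (themes : List (String × List String)) (expected : List String) : Prop :=
  (themes.map Prod.fst).Nodup
instance (themes : List (String × List String)) (expected : List String) : Decidable (Pre_ensure_complete_py themes expected) := by unfold Pre_ensure_complete_py; infer_instance

def pvWitness_ensure_complete_py : (List (String × List String)) × List String :=
  ([("T", ["a", "a", "c"]), ("S", ["b", "a"])], ["a", "b", "d"])

def Spec_ensure_complete_py (themes : List (String × List String)) (expected : List String) (out : List (String × List String)) : Prop := out = ensure_complete_py_alt themes expected
instance (themes : List (String × List String)) (expected : List String) (out : List (String × List String)) : Decidable (Spec_ensure_complete_py themes expected out) := by unfold Spec_ensure_complete_py; infer_instance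

-- ===== CLAIM (what is proved, stated in full; the proofs are below) =====
def Claim_equal_ensure_complete_py : Prop := ∀ (themes : List (String × List String)) (expected : List String), Dom_ensure_complete_py themes expected → Pre_ensure_complete_py themes expected → Spec_ensure_complete_py themes expected (ensure_complete_py themes expected)

-- ===== LEMMAS AND PROOFS =====

lemma pvInner_get (expected : List String) (t : String) :
    ∀ (fs : List String) (a : PySem.Dict String String) (g : String),
    (fs.foldl (pvAsgnStep expected t) a).get? g =
      if (PySem.Set.contains expected g && !(a.contains g) && fs.contains g) then some t
      else a.get? g := by
  intro fs
  induction fs with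
  | nil => intro a g; simp
  | cons f fs ih =>
    intro a g
    simp only [List.foldl_cons]
    by_cases hgf : g = f
    · subst hgf
      by_cases hc : (PySem.Set.contains expected g && !(a.contains g)) = true
      · simp only [Bool.and_eq_true, Bool.not_eq_true'] at hc
        obtain ⟨he, hna⟩ := hc
        have he' : g ∈ expected := by simpa [PySem.Set.contains] using he
        have hstep : pvAsgnStep expected t a g = a.insert g t := by
          simp [pvAsgnStep, he', hna]
        rw [hstep, ih]
        simp [PySem.Dict.contains_insert_self, PySem.Dict.get?_insert_self, he', hna]
      · have hstep : pvAsgnStep expected t a g = a := by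
          simp only [pvAsgnStep]
          rw [if_neg hc]
        rw [hstep, ih]
        simp only [Bool.and_eq_true] at hc ⊢
        rw [if_neg (by tauto), if_neg (by tauto)]
    · have hget : (pvAsgnStep expected t a f).get? g = a.get? g := by
        unfold pvAsgnStep; split
        · exact PySem.Dict.get?_insert_of_ne _ _ hgf
        · rfl
      have hcon : (pvAsgnStep expected t a f).contains g = a.contains g := by
        unfold pvAsgnStep; split
        · rw [PySem.Dict.contains_insert]; simp [hgf]
        · rfl
      have hmem : (f :: fs).contains g = fs.contains g := by
        simp [hgf]
      rw [ih, hget, hcon, hmem]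

lemma pvBuildAsgn_mono (expected : List String) :
    ∀ (ts : List (String × List String)) (a : PySem.Dict String String) (g v : String),
    a.get? g = some v → (pvBuildAsgn expected a ts).get? g = some v := by
  intro ts
  induction ts with
  | nil => intro a g v h; simpa [pvBuildAsgn] using h
  | cons tf rest ih =>
    intro a g v h
    simp only [pvBuildAsgn, List.foldl_cons]
    apply ih
    rw [pvInner_get]
    have : a.contains g = true := by
      rw [PySem.Dict.contains_eq_isSome_get?, h]; rfl
    simp [this, h]

lemma pvBuildAsgn_values (expected : List String) :
    ∀ (ts : List (String × List String)) (a : PySem.Dict String String) (g v : String),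
    (pvBuildAsgn expected a ts).get? g = some v →
    a.get? g = some v ∨ v ∈ ts.map Prod.fst := by
  intro ts
  induction ts with
  | nil => intro a g v h; left; simpa [pvBuildAsgn] using h
  | cons tf rest ih =>
    intro a g v h
    simp only [pvBuildAsgn, List.foldl_cons] at h
    rcases ih _ _ _ h with h' | h'
    · rw [pvInner_get] at h'
      by_cases hc : (PySem.Set.contains expected g && !(a.contains g) && tf.2.contains g) = true
      · rw [if_pos hc] at h'
        right; simp at h' ⊢; left; exact h'.symm
      · rw [if_neg hc] at h'
        left; exact h'
    · right; simp [h']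

lemma pvMain (expected : List String) :
    ∀ (ts : List (String × List String)) (seen : PySem.Set String)
      (asgn : PySem.Dict String String) (c : PySem.Dict String (List String)),
    (∀ f, PySem.Set.contains seen f = asgn.contains f) →
    (∀ f v, asgn.get? f = some v → v ∉ ts.map Prod.fst) →
    (ts.map Prod.fst).Nodup →
    (ts.foldl (pvStepA expected) (seen, c)).2 =
        ts.foldl (pvStepB (pvBuildAsgn expected asgn ts)) c ∧
    (∀ f, PySem.Set.contains (ts.foldl (pvStepA expected) (seen, c)).1 f =
        (pvBuildAsgn expected asgn ts).contains f) := by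
  intro ts
  induction ts with
  | nil =>
    intro seen asgn c hinv hvals hnd
    refine ⟨rfl, fun f => ?_⟩
    simpa [pvBuildAsgn] using hinv f
  | cons tf rest ih =>
    obtain ⟨t, fs⟩ := tf
    intro seen asgn c hinv hvals hnd
    simp only [List.map_cons, List.nodup_cons] at hnd
    obtain ⟨hTnotin, hndrest⟩ := hnd
    have hB : pvBuildAsgn expected asgn ((t, fs) :: rest) =
        pvBuildAsgn expected (fs.foldl (pvAsgnStep expected t) asgn) rest := by
      simp only [pvBuildAsgn, List.foldl_cons]
    -- the two kept lists coincide
    have hkeq : pvKeptB (pvBuildAsgn expected (fs.foldl (pvAsgnStep expected t) asgn) rest) t fs =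
        pvKeptA expected seen fs := by
      unfold pvKeptA pvKeptB
      apply List.filter_congr
      intro f hf
      have hsa := hinv f
      have hfs : fs.contains f = true := by simpa using hf
      have hiff : (pvBuildAsgn expected (fs.foldl (pvAsgnStep expected t) asgn) rest).get? f = some t ↔
          (PySem.Set.contains expected f && !(PySem.Set.contains seen f)) = true := by
        constructor
        · intro h
          rcases pvBuildAsgn_values expected rest _ f t h with h' | h'
          · rw [pvInner_get] at h'
            by_cases hc : (PySem.Set.contains expected f && !(asgn.contains f) && fs.contains f) = true
            · simp only [Bool.and_eq_true] at hc ⊢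
              exact ⟨hc.1.1, by rw [Bool.not_eq_true', hsa, ← Bool.not_eq_true']; exact hc.1.2⟩
            · rw [if_neg hc] at h'
              have := hvals f t h'
              simp at this
          · exact absurd h' hTnotin
        · intro h
          simp only [Bool.and_eq_true, Bool.not_eq_true'] at h
          obtain ⟨he, hs⟩ := h
          have hna : asgn.contains f = false := by rw [← hsa]; exact hs
          apply pvBuildAsgn_mono
          have hcond : (PySem.Set.contains expected f && !(asgn.contains f) && fs.contains f) = true := by
            simp only [hna, Bool.not_false, Bool.and_true, Bool.and_eq_true]
            exact ⟨he, hfs⟩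
          rw [pvInner_get, if_pos hcond]
      rw [Bool.eq_iff_iff]
      simpa [beq_iff_eq] using hiff
    -- the step states
    have hstepA : pvStepA expected (seen, c) (t, fs) =
        ((if pvKeptA expected seen fs ≠ [] then PySem.Set.update seen (pvKeptA expected seen fs) else seen),
         (if pvKeptA expected seen fs ≠ [] then c.insert t (pvKeptA expected seen fs) else c)) := by
      unfold pvStepA
      by_cases hk : pvKeptA expected seen fs = [] <;> simp [hk]
    have hstepB : pvStepB (pvBuildAsgn expected (fs.foldl (pvAsgnStep expected t) asgn) rest) c (t, fs) =
        (if pvKeptA expected seen fs ≠ [] then c.insert t (pvKeptA expected seen fs) else c) := by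
      unfold pvStepB
      rw [hkeq]
    -- invariant for the tail
    have hinv₂ : ∀ f, PySem.Set.contains
        (if pvKeptA expected seen fs ≠ [] then PySem.Set.update seen (pvKeptA expected seen fs) else seen) f =
        (fs.foldl (pvAsgnStep expected t) asgn).contains f := by
      intro f
      have h1 : PySem.Set.contains
          (if pvKeptA expected seen fs ≠ [] then PySem.Set.update seen (pvKeptA expected seen fs) else seen) f =
          (PySem.Set.contains seen f || (pvKeptA expected seen fs).contains f) := by
        by_cases hk : pvKeptA expected seen fs = []
        · simp [hk]
        · simp [hk]
      have h2 : (fs.foldl (pvAsgnStep expected t) asgn).contains f =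
          ((PySem.Set.contains expected f && !(asgn.contains f) && fs.contains f) || asgn.contains f) := by
        rw [PySem.Dict.contains_eq_isSome_get?, pvInner_get]
        by_cases hc : (PySem.Set.contains expected f && !(asgn.contains f) && fs.contains f) = true
        · simp only [hc]; simp
        · simp only [if_neg hc, ← PySem.Dict.contains_eq_isSome_get?]
          simp only [Bool.not_eq_true] at hc
          rw [hc]; simp
      have h3 : (pvKeptA expected seen fs).contains f =
          (fs.contains f && (PySem.Set.contains expected f && !(PySem.Set.contains seen f))) := by
        rw [Bool.eq_iff_iff]
        simp [pvKeptA, List.mem_filter]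
      rw [h1, h3, hinv f, h2]
      cases asgn.contains f <;> cases PySem.Set.contains expected f <;> cases fs.contains f <;> rfl
    have hvals₂ : ∀ f v, (fs.foldl (pvAsgnStep expected t) asgn).get? f = some v →
        v ∉ rest.map Prod.fst := by
      intro f v hv
      rw [pvInner_get] at hv
      by_cases hc : (PySem.Set.contains expected f && !(asgn.contains f) && fs.contains f) = true
      · rw [if_pos hc] at hv
        have : v = t := by simpa using hv.symm
        subst this; exact hTnotin
      · rw [if_neg hc] at hv
        have := hvals f v hv
        simp only [List.map_cons, List.mem_cons, not_or] at this
        exact this.2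
    obtain ⟨ihA, ihS⟩ := ih
      (if pvKeptA expected seen fs ≠ [] then PySem.Set.update seen (pvKeptA expected seen fs) else seen)
      (fs.foldl (pvAsgnStep expected t) asgn)
      (if pvKeptA expected seen fs ≠ [] then c.insert t (pvKeptA expected seen fs) else c)
      hinv₂ hvals₂ hndrest
    constructor
    · simp only [List.foldl_cons, hstepA, hB, hstepB]
      exact ihA
    · intro f
      simp only [List.foldl_cons, hstepA, hB]
      exact ihS f

lemma pvKeys_contains (d : PySem.Dict String String) (x : String) :
    PySem.Set.contains (d.keys) x = d.contains x := by
  rw [Bool.eq_iff_iff]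
  simp [PySem.Set.contains, PySem.Dict.keys, PySem.Dict.contains, List.any_eq, List.mem_map]

-- ===== VERDICT (by name: the statement is the Claim_ definition above) =====
theorem ensure_complete_py_spec : Claim_equal_ensure_complete_py := by
  intro themes expected _ hpre
  unfold Spec_ensure_complete_py
  obtain ⟨hA, hS⟩ := pvMain expected themes PySem.Set.empty PySem.Dict.empty PySem.Dict.empty
    (fun f => rfl) (fun f v h => by simp [PySem.Dict.get?_empty] at h) hpre
  simp only [ensure_complete_py, ensure_complete_py_alt]
  have hmiss : PySem.Set.diff expected (themes.foldl (pvStepA expected) (PySem.Set.empty, PySem.Dict.empty)).1 =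
      PySem.Set.diff expected (pvBuildAsgn expected PySem.Dict.empty themes).keys := by
    unfold PySem.Set.diff
    apply List.filter_congr
    intro x _
    rw [show (themes.foldl (pvStepA expected) (PySem.Set.empty, PySem.Dict.empty)).1.contains x =
        (pvBuildAsgn expected PySem.Dict.empty themes).contains x from hS x, ← pvKeys_contains]
  rw [hmiss, hA]
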